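-- pv_equiv track=rewrite | github.com/Alexander-philip-sage/algorithm_challenges | color_cards.py | order_colors
-- ===== SOURCE A (Python) =====
-- from typing import List
--
-- def order_colors(challenge:List[str])->str:
--     colors_seen = set()
--     result = ''
--     for i in range(len(challenge)):
--         if i==0:
--             colors_seen.add(challenge[i])
--             result = challenge[i]
--         else:
--             if challenge[i]!=challenge[i-1]:
--
--                 if  challenge[i] in colors_seen:
--
--                     return 'IMPOSSIBLE'
--                 else:
--                     result += ' '+challenge[i]
--                     colors_seen.add(challenge[i])
--     return result
-- ===== SOURCE B (Python) =====
-- from typing import List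
--
-- def order_colors(challenge: List[str]) -> str:
--     # A color sequence is orderable iff every color's occurrences form one
--     # contiguous block: check, per distinct color, the interval between its
--     # first and last occurrence; output the distinct colors in first-occurrence order.
--     n = len(challenge)
--     order = list(dict.fromkeys(challenge))
--     for c in order:
--         first = challenge.index(c)
--         last = n - 1 - challenge[::-1].index(c)
--         if any(challenge[i] != c for i in range(first, last + 1)):
--             return 'IMPOSSIBLE'
--     return ' '.join(order)
-- ===== Notes on version B (the rewrite author's own statement) =====
-- stated objective: alternative
-- what changed: Replaces A's single left-to-right pass (seen-set plus incremental string with early return on a repeated run) by a global occurrence-interval check: dedup the colors in first-occurrence order, then for each distinct color verify that the slice between its first and last occurrence is solid; impossibility is detected by interval inspection, not by run collapsing.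
import Mathlib
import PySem

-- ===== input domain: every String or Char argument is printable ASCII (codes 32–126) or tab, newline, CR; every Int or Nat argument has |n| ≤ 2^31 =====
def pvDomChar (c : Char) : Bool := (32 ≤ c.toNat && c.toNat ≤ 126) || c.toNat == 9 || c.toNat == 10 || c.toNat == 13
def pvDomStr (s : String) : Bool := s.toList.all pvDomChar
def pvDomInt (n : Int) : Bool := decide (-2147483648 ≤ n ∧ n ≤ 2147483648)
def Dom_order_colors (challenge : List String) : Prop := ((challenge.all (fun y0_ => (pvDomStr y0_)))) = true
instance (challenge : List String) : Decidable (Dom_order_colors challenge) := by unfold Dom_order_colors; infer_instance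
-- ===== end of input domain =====

-- B replaces A's single left-to-right pass (seen-set plus incremental string, early return) by a
-- global occurrence-interval check: dedup the colors in first-occurrence order, then for each
-- distinct color verify the segment between its first and last occurrence is solid — an
-- alternative algorithm of the same order, not claimed faster.

-- ===== PORT A =====
-- index loop 'for i in range(len(challenge))'; the indices i and i-1 read inside the loop are
-- provably in range, so List.getD is exact here.
def pvLoopA (challenge : List String) (i : Nat) (seen : PySem.Set String) (result : String) : String :=
  if _h : i < challenge.length then
    if i = 0 then
      pvLoopA challenge (i+1) (PySem.Set.add seen (challenge.getD i "")) (challenge.getD i "")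
    else
      if challenge.getD i "" ≠ challenge.getD (i-1) "" then
        if PySem.Set.contains seen (challenge.getD i "") then "IMPOSSIBLE"
        else pvLoopA challenge (i+1) (PySem.Set.add seen (challenge.getD i ""))
               (result ++ (" " ++ challenge.getD i ""))
      else pvLoopA challenge (i+1) seen result
  else result
termination_by challenge.length - i

def order_colors (challenge : List String) : String :=
  pvLoopA challenge 0 PySem.Set.empty ""

-- ===== PORT B =====
-- 'challenge.index(c)' and 'challenge[::-1].index(c)' never raise here (c is drawn from the
-- dedup of challenge), and 'challenge[i]' has first ≤ i ≤ last < len in range, so the .getD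
-- defaults are exact; 'challenge[::-1]' is List.reverse (exact).
def pvBad (L : List String) (n : Int) (c : String) : Bool :=
  let first : Int := (((PySem.List.index? L c).getD 0 : Nat) : Int)
  let lastI : Int := n - 1 - (((PySem.List.index? L.reverse c).getD 0 : Nat) : Int)
  (PySem.List.pyRange first (lastI + 1) 1).any (fun i => PySem.List.pyGetD L i "" != c)

def order_colors_alt (challenge : List String) : String :=
  let n : Int := (challenge.length : Int)
  let order := PySem.List.dedup challenge
  if order.any (pvBad challenge n) then "IMPOSSIBLE"
  else PySem.Str.join " " order

-- ===== PRECONDITION & SPEC =====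
def Spec_order_colors (challenge : List String) (out : String) : Prop := out = order_colors_alt challenge
instance (challenge : List String) (out : String) : Decidable (Spec_order_colors challenge out) := by unfold Spec_order_colors; infer_instance

-- ===== CLAIM (what is proved, stated in full; the proofs are below) =====
def Claim_equal_order_colors : Prop := ∀ (challenge : List String), Dom_order_colors challenge → Spec_order_colors challenge (order_colors challenge)

-- ===== LEMMAS AND PROOFS =====

-- run representatives after a previous element `prev` (the tail of the run list)
def pvTail (prev : String) : List String → List String
  | [] => []
  | c :: t => if c = prev then pvTail prev t else c :: pvTail c t

-- A's loop from index ≥ 1, rephrased structurally on the remaining list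
def pvProc : List String → String → PySem.Set String → String → String
  | [], _, _, res => res
  | c :: t, prev, seen, res =>
      if c ≠ prev then
        if PySem.Set.contains seen c then "IMPOSSIBLE"
        else pvProc t c (PySem.Set.add seen c) (res ++ (" " ++ c))
      else pvProc t c seen res

-- A's string accumulator: res extended by ' '+c for each run representative
def pvExt : String → List String → String
  | res, [] => res
  | res, c :: t => pvExt (res ++ (" " ++ c)) t

lemma pvLoopA_eq (challenge : List String) :
    ∀ k i seen res, challenge.length - i ≤ k → 1 ≤ i →
      pvLoopA challenge i seen res = pvProc (challenge.drop i) (challenge.getD (i-1) "") seen res := by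
  intro k
  induction k with
  | zero =>
    intro i seen res hk hi
    have hlen : challenge.length ≤ i := by omega
    rw [pvLoopA, List.drop_eq_nil_of_le hlen]
    simp [pvProc, Nat.not_lt.mpr hlen]
  | succ k ih =>
    intro i seen res hk hi
    by_cases h : i < challenge.length
    · have hdrop : challenge.drop i = challenge[i] :: challenge.drop (i+1) :=
        List.drop_eq_getElem_cons h
      have hget : challenge.getD i "" = challenge[i] := List.getD_eq_getElem challenge "" h
      have hnext : challenge.getD ((i+1)-1) "" = challenge[i] := by simpa using hget
      have hi0 : ¬ (i = 0) := by omega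
      have hrec : challenge.length - (i+1) ≤ k := by omega
      rw [pvLoopA, dif_pos h, if_neg hi0, hget, hdrop,
        ih (i+1) (PySem.Set.add seen challenge[i]) (res ++ (" " ++ challenge[i])) hrec (by omega),
        ih (i+1) seen res hrec (by omega), hnext]
      rfl
    · have hlen : challenge.length ≤ i := by omega
      rw [pvLoopA, List.drop_eq_nil_of_le hlen]
      simp [pvProc, Nat.not_lt.mpr hlen]

lemma pvProc_spec :
    ∀ (rest : List String) (prev : String) (L : List String) (res : String), L.Nodup →
      pvProc rest prev L res =
        if (L ++ pvTail prev rest).Nodup then pvExt res (pvTail prev rest) else "IMPOSSIBLE" := by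
  intro rest
  induction rest with
  | nil =>
    intro prev L res hL
    simp [pvProc, pvTail, pvExt, hL]
  | cons c t ih =>
    intro prev L res hL
    by_cases hcp : c = prev
    · subst hcp
      have hT : pvTail c (c :: t) = pvTail c t := by simp [pvTail]
      rw [hT]
      simp only [pvProc, ne_eq, not_true_eq_false, if_false]
      exact ih c L res hL
    · have hT : pvTail prev (c :: t) = c :: pvTail c t := by simp [pvTail, hcp]
      rw [hT]
      by_cases hm : c ∈ L
      · have hnd : ¬ (L ++ c :: pvTail c t).Nodup := by
          rw [List.nodup_append]
          rintro ⟨-, -, hdisj⟩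
          exact hdisj c hm c (List.Mem.head _) rfl
        rw [if_neg hnd]
        simp [pvProc, hcp, hm]
      · have hcontains : PySem.Set.contains L c = false := by
          rw [Bool.eq_false_iff]
          intro hx
          exact hm ((PySem.Set.contains_iff L c).mp hx)
        have hadd : PySem.Set.add L c = L ++ [c] := by
          unfold PySem.Set.add
          rw [hcontains]
          rfl
        have hL' : (L ++ [c]).Nodup := by
          rw [List.nodup_append]
          refine ⟨hL, List.nodup_singleton c, ?_⟩
          intro a ha b hb
          rcases List.mem_singleton.mp hb with rfl
          rintro rfl
          exact hm ha
        have hred : pvProc (c :: t) prev L res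
            = pvProc t c (PySem.Set.add L c) (res ++ (" " ++ c)) := by
          simp [pvProc, hcp, hm]
        rw [hred, hadd, ih c (L ++ [c]) (res ++ (" " ++ c)) hL']
        have hassoc : (L ++ [c]) ++ pvTail c t = L ++ c :: pvTail c t := by simp
        rw [hassoc]
        rfl

-- A's value on a nonempty list, characterised by the run-representative list
lemma orderA_char (c : String) (rest : List String) :
    order_colors (c :: rest) =
      if (c :: pvTail c rest).Nodup then pvExt c (pvTail c rest) else "IMPOSSIBLE" := by
  have hstep : order_colors (c :: rest) = pvProc rest c [c] c := by
    unfold order_colors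
    rw [pvLoopA]
    simp only [List.length_cons, Nat.succ_pos, dif_pos]
    have hadd : PySem.Set.add PySem.Set.empty c = [c] := rfl
    have hget : (c :: rest).getD 0 "" = c := rfl
    rw [if_pos trivial, hget, hadd, show (0+1 : Nat) = 1 from rfl,
      pvLoopA_eq (c :: rest) rest.length 1 [c] c (by simp) (by omega)]
    rfl
  rw [hstep, pvProc_spec rest c [c] c (List.nodup_singleton c)]
  rfl

lemma chars_join_merge (s p q : List Char) (r : List (List Char)) :
    PySem.Chars.join s (p :: q :: r) = PySem.Chars.join s ((p ++ s ++ q) :: r) := by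
  cases r with
  | nil => simp [PySem.Chars.join_cons_cons, PySem.Chars.join_singleton, List.append_assoc]
  | cons e r' => simp [PySem.Chars.join_cons_cons, List.append_assoc]

lemma pvJoin_eq : ∀ (T : List String) (c : String), PySem.Str.join " " (c :: T) = pvExt c T := by
  intro T
  induction T with
  | nil =>
    intro c
    apply String.toList_inj.mp
    simp [PySem.Str.toList_join, PySem.Chars.join_singleton, pvExt]
  | cons d T' ih =>
    intro c
    have h1 : PySem.Str.join " " (c :: d :: T') = PySem.Str.join " " ((c ++ (" " ++ d)) :: T') := by
      apply String.toList_inj.mp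
      rw [PySem.Str.toList_join, PySem.Str.toList_join]
      simp only [List.map, String.toList_append]
      rw [chars_join_merge]
      simp [List.append_assoc]
    rw [h1, ih]
    rfl

-- the run representatives carry exactly the elements of the list
lemma mem_pvTail : ∀ (t : List String) (p x : String), x ∈ p :: pvTail p t ↔ x ∈ p :: t := by
  intro t
  induction t with
  | nil => intro p x; rfl
  | cons c t' ih =>
    intro p x
    by_cases h : c = p
    · subst h
      rw [show pvTail c (c :: t') = pvTail c t' from by simp [pvTail]]
      rw [ih c x]
      simp
    · rw [show pvTail p (c :: t') = c :: pvTail c t' from by simp [pvTail, h]]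
      constructor
      · intro hx
        rcases List.mem_cons.mp hx with rfl | hx2
        · exact List.Mem.head _
        · rcases List.mem_cons.mp ((ih c x).mp hx2) with rfl | h2
          · exact List.mem_cons_of_mem _ (List.Mem.head _)
          · exact List.mem_cons_of_mem _ (List.mem_cons_of_mem _ h2)
      · intro hx
        rcases List.mem_cons.mp hx with rfl | hx2
        · exact List.Mem.head _
        · rcases List.mem_cons.mp hx2 with rfl | h2
          · exact List.mem_cons_of_mem _ (List.Mem.head _)
          · exact List.mem_cons_of_mem _ ((ih c x).mpr (List.mem_cons_of_mem _ h2))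

-- run collapsing preserves the first-occurrence set
lemma ofList_pvTail : ∀ (t : List String) (p : String),
    PySem.Set.ofList (p :: pvTail p t) = PySem.Set.ofList (p :: t) := by
  intro t
  induction t with
  | nil => intro p; rfl
  | cons c t' ih =>
    intro p
    by_cases h : c = p
    · subst h
      rw [show pvTail c (c :: t') = pvTail c t' from by simp [pvTail], ih c]
      rw [PySem.Set.ofList_cons, PySem.Set.ofList_cons (x := c) (xs := c :: t'),
        PySem.Set.ofList_cons]
      simp [PySem.Set.discard]
    · rw [show pvTail p (c :: t') = c :: pvTail c t' from by simp [pvTail, h]]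
      rw [PySem.Set.ofList_cons, PySem.Set.ofList_cons (x := p) (xs := c :: t'), ih c]

lemma triple_step {a b x : String} {l : List String} (hab : a ≠ b)
    (h : [a, b, a].Sublist (x :: x :: l)) : [a, b, a].Sublist (x :: l) := by
  rcases List.sublist_cons_iff.mp h with h1 | ⟨r, hr, hsub⟩
  · exact h1
  · obtain ⟨rfl, rfl⟩ : a = x ∧ r = [b, a] := by
      constructor <;> injection hr with h1 h2 <;> simp_all
    rcases List.sublist_cons_iff.mp hsub with h2 | ⟨r2, hr2, -⟩
    · exact h2.cons₂ a
    · exfalso; apply hab; injection hr2 with h1 _; exact h1.symm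

-- duplicate run representative ↔ an a…b…a pattern (a ≠ b) occurs in the list
lemma dup_iff_triple : ∀ (t : List String) (p : String),
    ¬ (p :: pvTail p t).Nodup ↔ ∃ a b, a ≠ b ∧ [a, b, a].Sublist (p :: t) := by
  intro t
  induction t with
  | nil =>
    intro p
    constructor
    · intro h; exact absurd (by simp [pvTail]) h
    · rintro ⟨a, b, hab, hsub⟩
      have := hsub.length_le
      simp at this
  | cons c t' ih =>
    intro p
    by_cases h : c = p
    · subst h
      rw [show pvTail c (c :: t') = pvTail c t' from by simp [pvTail]]
      rw [ih c]
      constructor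
      · rintro ⟨a, b, hab, hsub⟩
        exact ⟨a, b, hab, hsub.cons c⟩
      · rintro ⟨a, b, hab, hsub⟩
        exact ⟨a, b, hab, triple_step hab hsub⟩
    · rw [show pvTail p (c :: t') = c :: pvTail c t' from by simp [pvTail, h]]
      constructor
      · intro hnd
        rw [List.nodup_cons] at hnd
        push_neg at hnd
        by_cases hmem : p ∈ c :: pvTail c t'
        · have hp : p ∈ c :: t' := (mem_pvTail t' c p).mp hmem
          have hpt : p ∈ t' := by
            rcases List.mem_cons.mp hp with rfl | h2
            · simp_all
            · exact h2
          refine ⟨p, c, fun he => h he.symm, ?_⟩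
          exact (((List.singleton_sublist.mpr hpt).cons₂ c).cons₂ p)
        · have hdup : ¬ (c :: pvTail c t').Nodup := fun hn => hnd hmem hn
          rcases (ih c).mp hdup with ⟨a, b, hab, hsub⟩
          exact ⟨a, b, hab, hsub.cons p⟩
      · rintro ⟨a, b, hab, hsub⟩
        rcases List.sublist_cons_iff.mp hsub with h1 | ⟨r, hr, hsub2⟩
        · have : ¬ (c :: pvTail c t').Nodup := (ih c).mpr ⟨a, b, hab, h1⟩
          rw [List.nodup_cons]
          tauto
        · obtain ⟨rfl, rfl⟩ : a = p ∧ r = [b, a] := by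
            constructor <;> injection hr with h1 h2 <;> simp_all
          have ha : a ∈ c :: t' := hsub2.subset (by simp)
          have hat : a ∈ t' := by
            rcases List.mem_cons.mp ha with rfl | h2
            · simp_all
            · exact h2
          have : a ∈ c :: pvTail c t' := (mem_pvTail t' c a).mpr (List.mem_cons_of_mem _ hat)
          rw [List.nodup_cons]
          tauto

lemma triple_of_indices {L : List String} {a b : String} {p q r : Nat}
    (hpq : p < q) (hqr : q < r)
    (hp : L[p]? = some a) (hq : L[q]? = some b) (hr : L[r]? = some a) :
    [a, b, a].Sublist L := by
  obtain ⟨hrlt, hrv⟩ := List.getElem?_eq_some_iff.mp hr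
  obtain ⟨hqlt, hqv⟩ := List.getElem?_eq_some_iff.mp hq
  obtain ⟨hplt, hpv⟩ := List.getElem?_eq_some_iff.mp hp
  have h3 : [a].Sublist (L.drop r) := by
    rw [← List.getElem_cons_drop hrlt, hrv]
    exact (List.nil_sublist _).cons₂ a
  have h2 : [b, a].Sublist (L.drop q) := by
    rw [← List.getElem_cons_drop hqlt, hqv]
    refine List.Sublist.cons₂ b ?_
    have : L.drop r = (L.drop (q+1)).drop (r - (q+1)) := by
      rw [List.drop_drop]; congr 1; omega
    exact this ▸ h3 |>.trans (List.drop_sublist _ _)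
  have h1 : [a, b, a].Sublist (L.drop p) := by
    rw [← List.getElem_cons_drop hplt, hpv]
    refine List.Sublist.cons₂ a ?_
    have : L.drop q = (L.drop (p+1)).drop (q - (p+1)) := by
      rw [List.drop_drop]; congr 1; omega
    exact this ▸ h2 |>.trans (List.drop_sublist _ _)
  exact h1.trans (List.drop_sublist _ _)

-- B's per-color test, characterised by first/last occurrence indices
lemma pvBad_true_iff {L : List String} {c : String} {f g : Nat}
    (hf : PySem.List.index? L c = some f)
    (hg : PySem.List.index? L.reverse c = some g) :
    (pvBad L (L.length : Int) c = true ↔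
      ∃ k : Nat, f ≤ k ∧ k ≤ L.length - 1 - g ∧ L.getD k "" ≠ c) := by
  obtain ⟨hglt, -, -⟩ := PySem.List.getElem_of_index?_eq_some hg
  have hglen : g < L.length := by simpa using hglt
  unfold pvBad
  rw [hf, hg]
  simp only [Option.getD_some]
  constructor
  · intro h
    obtain ⟨i, hi, hpi⟩ := List.any_eq_true.mp h
    rw [PySem.List.mem_pyRange_one] at hi
    have h0 : (0 : Int) ≤ i := le_trans (by positivity) hi.1
    refine ⟨i.toNat, by omega, by omega, ?_⟩
    rw [← Int.toNat_of_nonneg h0, PySem.List.pyGetD_natCast] at hpi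
    exact bne_iff_ne.mp hpi
  · rintro ⟨k, hfk, hkr, hkc⟩
    refine List.any_eq_true.mpr ⟨(k : Int), ?_, ?_⟩
    · rw [PySem.List.mem_pyRange_one]
      refine ⟨by exact_mod_cast hfk, by omega⟩
    · rw [PySem.List.pyGetD_natCast]
      exact bne_iff_ne.mpr hkc

lemma any_bad_iff (L : List String) :
    ((PySem.List.dedup L).any (pvBad L (L.length : Int)) = true) ↔
      ∃ a b, a ≠ b ∧ [a, b, a].Sublist L := by
  constructor
  · intro h
    obtain ⟨c, hcmem, hbad⟩ := List.any_eq_true.mp h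
    have hcL : c ∈ L := (PySem.List.mem_dedup L c).mp hcmem
    obtain ⟨f, hf⟩ :=
      Option.isSome_iff_exists.mp ((PySem.List.index?_isSome_iff L c).mpr hcL)
    obtain ⟨g, hg⟩ :=
      Option.isSome_iff_exists.mp
        ((PySem.List.index?_isSome_iff L.reverse c).mpr (List.mem_reverse.mpr hcL))
    obtain ⟨k, hfk, hkr, hkc⟩ := (pvBad_true_iff hf hg).mp hbad
    obtain ⟨hflt, hfv, -⟩ := PySem.List.getElem_of_index?_eq_some hf
    obtain ⟨hglt, hgv, -⟩ := PySem.List.getElem_of_index?_eq_some hg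
    have hglen : g < L.length := by simpa using hglt
    have hrlt : L.length - 1 - g < L.length := by omega
    have hrv : L[L.length - 1 - g]'hrlt = c := by
      rw [List.getElem_reverse] at hgv
      exact hgv
    have hklen : k < L.length := by omega
    have hkv : L.getD k "" = L[k]'hklen := List.getD_eq_getElem L "" hklen
    rw [hkv] at hkc
    have hfk' : f < k :=
      lt_of_le_of_ne hfk (fun he => hkc (by subst he; rw [hfv]))
    have hkr' : k < L.length - 1 - g :=
      lt_of_le_of_ne hkr (fun he => hkc (by subst he; rw [hrv]))
    refine ⟨c, L[k]'hklen, fun he => hkc he.symm, ?_⟩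
    exact triple_of_indices hfk' hkr'
      (List.getElem?_eq_some_iff.mpr ⟨hflt, hfv⟩)
      (List.getElem?_eq_some_iff.mpr ⟨hklen, rfl⟩)
      (List.getElem?_eq_some_iff.mpr ⟨hrlt, hrv⟩)
  · rintro ⟨a, b, hab, hsub⟩
    obtain ⟨is, hmap, hpw⟩ := List.sublist_eq_map_getElem hsub
    obtain ⟨p, q, r', rfl⟩ : ∃ p q r', is = [p, q, r'] := by
      rcases is with _ | ⟨p, _ | ⟨q, _ | ⟨r', _ | ⟨x, t⟩⟩⟩⟩ <;>
        first
          | exact ⟨_, _, _, rfl⟩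
          | (exfalso; have := congrArg List.length hmap; simp at this)
    simp only [List.map, List.cons.injEq, and_true] at hmap
    obtain ⟨hpa, hqb, hra⟩ := hmap
    have hpq : (p : Nat) < (q : Nat) := by
      have := List.pairwise_cons.mp hpw
      exact this.1 q (by simp)
    have hqr : (q : Nat) < (r' : Nat) := by
      have := (List.pairwise_cons.mp (List.pairwise_cons.mp hpw).2).1 r' (by simp)
      exact this
    have haL : a ∈ L := by rw [hpa]; exact List.getElem_mem _
    obtain ⟨f, hf⟩ :=
      Option.isSome_iff_exists.mp ((PySem.List.index?_isSome_iff L a).mpr haL)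
    obtain ⟨g, hg⟩ :=
      Option.isSome_iff_exists.mp
        ((PySem.List.index?_isSome_iff L.reverse a).mpr (List.mem_reverse.mpr haL))
    obtain ⟨hflt, hfv, hfmin⟩ := PySem.List.getElem_of_index?_eq_some hf
    obtain ⟨hglt, hgv, hgmin⟩ := PySem.List.getElem_of_index?_eq_some hg
    have hglen : g < L.length := by simpa using hglt
    have hfp : f ≤ (p : Nat) :=
      not_lt.mp (fun hlt => hfmin (p : Nat) hlt hpa.symm)
    have hrr : (r' : Nat) ≤ L.length - 1 - g := by
      by_contra hlt
      push_neg at hlt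
      have hjg : L.length - 1 - (r' : Nat) < g := by
        have := r'.isLt
        omega
      have hrev : L.reverse[L.length - 1 - (r' : Nat)]'(by simp; omega) = a := by
        rw [List.getElem_reverse]
        have heq : L.length - 1 - (L.length - 1 - (r' : Nat)) = (r' : Nat) := by
          have := r'.isLt
          omega
        simp only [heq]
        exact hra.symm
      exact hgmin _ hjg hrev
    refine List.any_eq_true.mpr ⟨a, (PySem.List.mem_dedup L a).mpr haL, ?_⟩
    refine (pvBad_true_iff hf hg).mpr ⟨(q : Nat), by omega, by omega, ?_⟩
    rw [List.getD_eq_getElem L "" q.isLt]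
    intro he
    exact hab ((hqb.trans he).symm)

-- ===== VERDICT (by name: the statement is the Claim_ definition above) =====
theorem order_colors_spec : Claim_equal_order_colors := by
  intro challenge _hdom
  unfold Spec_order_colors
  cases challenge with
  | nil =>
    show pvLoopA [] 0 PySem.Set.empty "" = order_colors_alt []
    rw [pvLoopA]
    rfl
  | cons c rest =>
    rw [orderA_char]
    unfold order_colors_alt
    by_cases hnd : (c :: pvTail c rest).Nodup
    · have hno : ¬ ∃ a b, a ≠ b ∧ [a, b, a].Sublist (c :: rest) :=
        fun h => ((dup_iff_triple rest c).mpr h) hnd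
      have hany : ((PySem.List.dedup (c :: rest)).any
          (pvBad (c :: rest) ((c :: rest).length : Int))) = false := by
        rw [Bool.eq_false_iff]
        intro h
        exact hno ((any_bad_iff (c :: rest)).mp h)
      rw [if_pos hnd]
      simp only [hany, Bool.false_eq_true, if_false]
      have hded : PySem.List.dedup (c :: rest) = c :: pvTail c rest := by
        rw [PySem.List.dedup_eq_ofList, ← ofList_pvTail rest c,
          PySem.Set.ofList_eq_self_of_nodup _ hnd]
      rw [hded, pvJoin_eq]
    · have htriple := (dup_iff_triple rest c).mp hnd
      have hany : ((PySem.List.dedup (c :: rest)).any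
          (pvBad (c :: rest) ((c :: rest).length : Int))) = true :=
        (any_bad_iff (c :: rest)).mpr htriple
      rw [if_neg hnd]
      simp only [hany, if_true]
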